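-- pv_equiv track=rewrite | github.com/ReliableDragon/random_generator_v2 | equation_parser.py | remove_extraneous_spaces
-- ===== SOURCE A (Python) =====
-- def remove_extraneous_spaces(eq_str):
--     result = ''
--     is_quoted = False
--     for c in eq_str:
--         if c == '"':
--             is_quoted = not is_quoted
--         if is_quoted or c != ' ':
--             result += c
--     return result
-- ===== SOURCE B (Python) =====
-- def remove_extraneous_spaces(eq_str):
--     segments = eq_str.split('"')
--     parts = [seg if i % 2 else seg.replace(' ', '') for i, seg in enumerate(segments)]
--     return '"'.join(parts)
-- ===== Notes on version B (the rewrite author's own statement) =====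
-- stated objective: idiomatic
-- what changed: Replaced the char-by-char quote-toggle state machine with a split-on-quote / strip-spaces-from-even-segments / rejoin pipeline.
import Mathlib
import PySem

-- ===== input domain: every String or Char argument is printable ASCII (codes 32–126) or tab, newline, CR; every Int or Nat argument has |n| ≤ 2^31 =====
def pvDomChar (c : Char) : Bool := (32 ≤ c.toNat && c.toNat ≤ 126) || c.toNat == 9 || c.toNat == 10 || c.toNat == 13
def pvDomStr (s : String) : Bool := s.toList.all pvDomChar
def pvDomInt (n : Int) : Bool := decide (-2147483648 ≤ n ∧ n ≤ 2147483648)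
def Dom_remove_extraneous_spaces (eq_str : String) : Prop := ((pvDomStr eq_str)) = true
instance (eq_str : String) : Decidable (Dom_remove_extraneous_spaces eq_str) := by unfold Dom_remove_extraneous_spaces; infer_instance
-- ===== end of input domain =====

-- B replaces A's char-by-char quote-toggle state machine by a split-on-'"' / remove-spaces-in-even-segments / rejoin pipeline (idiomatic, same cost).

-- ===== PORT A =====
-- result += c over chars, with the is_quoted toggle; ported as a foldl of the loop body over the char list.
def pvStep (st : List Char × Bool) (c : Char) : List Char × Bool :=
  let is_quoted := if c = '"' then !st.2 else st.2
  if is_quoted || c ≠ ' ' then (st.1 ++ [c], is_quoted) else (st.1, is_quoted)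

def remove_extraneous_spaces (eq_str : String) : String :=
  let st := eq_str.toList.foldl pvStep ([], false)
  String.ofList st.1

-- ===== PORT B =====
-- segments = eq_str.split('"'); even-indexed segments get seg.replace(' ', ''); '"'.join(...)
def remove_extraneous_spaces_alt (eq_str : String) : String :=
  let segments := PySem.Chars.splitOn eq_str.toList ['"']
  let parts := (PySem.List.enumerate segments).map
    (fun p => if PySem.Int.mod p.1 2 ≠ 0 then p.2 else PySem.Chars.replace p.2 [' '] [])
  String.ofList (PySem.Chars.join ['"'] parts)

-- ===== PRECONDITION & SPEC =====
def Spec_remove_extraneous_spaces (eq_str : String) (out : String) : Prop := out = remove_extraneous_spaces_alt eq_str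
instance (eq_str : String) (out : String) : Decidable (Spec_remove_extraneous_spaces eq_str out) := by unfold Spec_remove_extraneous_spaces; infer_instance

-- ===== CLAIM (what is proved, stated in full; the proofs are below) =====
def Claim_equal_remove_extraneous_spaces : Prop := ∀ (eq_str : String), Dom_remove_extraneous_spaces eq_str → Spec_remove_extraneous_spaces eq_str (remove_extraneous_spaces eq_str)

-- ===== LEMMAS AND PROOFS =====

-- A's loop as a pure recursion on the char list.
def pvF : List Char → Bool → List Char
  | [], _ => []
  | c :: cs, q =>
    let q' := if c = '"' then !q else q
    (if q' || c ≠ ' ' then [c] else []) ++ pvF cs q'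

-- the common normal form: alternating transform over the segments
def pvT : List (List Char) → Bool → List Char
  | [], _ => []
  | [s], q => if q then s else s.filter (· ≠ ' ')
  | s :: r :: rest, q => (if q then s else s.filter (· ≠ ' ')) ++ '"' :: pvT (r :: rest) (!q)

theorem pvFoldA (cs : List Char) (acc : List Char) (q : Bool) :
    (cs.foldl pvStep (acc, q)).1 = acc ++ pvF cs q := by
  induction cs generalizing acc q with
  | nil => simp [pvF]
  | cons c cs ih =>
    rw [List.foldl_cons]
    have hstep : pvStep (acc, q) c
        = (acc ++ (if (if c = '"' then !q else q) || c ≠ ' ' then [c] else []),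
           if c = '"' then !q else q) := by
      unfold pvStep
      split_ifs <;> simp_all
    rw [hstep, ih]
    simp [pvF, List.append_assoc]

theorem pvSplitOnGo : ∀ (l : List Char) (fuel : Nat), l.length < fuel → ∀ (cur : List Char) (acc : List (List Char)),
    PySem.Chars.splitOn.go ['"'] fuel l cur acc
      = acc.reverse ++ List.modifyHead (fun x => cur.reverse ++ x) (List.splitOn '"' l) := by
  intro l
  induction l with
  | nil =>
    intro fuel hf cur acc
    cases fuel with
    | zero => omega
    | succ f => simp [PySem.Chars.splitOn.go, List.splitOn, List.splitOnP, List.splitOnP.go, List.modifyHead]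
  | cons c rest ih =>
    intro fuel hf cur acc
    cases fuel with
    | zero => omega
    | succ f =>
      rw [show PySem.Chars.splitOn.go ['"'] (f+1) (c :: rest) cur acc
          = if List.isPrefixOf ['"'] (c :: rest) then
              PySem.Chars.splitOn.go ['"'] f rest [] (cur.reverse :: acc)
            else PySem.Chars.splitOn.go ['"'] f rest (c :: cur) acc from rfl]
      by_cases hc : c = '"'
      · subst hc
        rw [if_pos (by simp [List.isPrefixOf])]
        rw [ih f (by simpa using hf) [] (cur.reverse :: acc)]
        have hne := List.splitOnP_ne_nil (fun x => x == '"') rest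
        rcases h : List.splitOnP (fun x => x == '"') rest with _ | ⟨s, t⟩
        · exact absurd h hne
        · simp [List.splitOn, List.splitOnP_cons, h, List.modifyHead]
      · rw [if_neg (by simp [List.isPrefixOf]; exact fun h => hc h.symm)]
        rw [ih f (by simpa using hf) (c :: cur) acc]
        have hne := List.splitOnP_ne_nil (fun x => x == '"') rest
        rcases h : List.splitOnP (fun x => x == '"') rest with _ | ⟨s, t⟩
        · exact absurd h hne
        · simp [List.splitOn, List.splitOnP_cons, h, List.modifyHead, hc, List.append_assoc]

theorem pvSplitOn (l : List Char) :
    PySem.Chars.splitOn l ['"'] = List.splitOn '"' l := by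
  rw [show PySem.Chars.splitOn l ['"'] = PySem.Chars.splitOn.go ['"'] (l.length + 1) l [] [] from rfl]
  rw [pvSplitOnGo l (l.length + 1) (by omega) [] []]
  have hne := List.splitOnP_ne_nil (fun x => x == '"') l
  rcases h : List.splitOnP (fun x => x == '"') l with _ | ⟨s, t⟩
  · exact absurd h hne
  · simp [List.splitOn, h, List.modifyHead]

theorem pvReplaceGo : ∀ (l : List Char) (fuel : Nat), l.length ≤ fuel → ∀ (acc : List Char),
    PySem.Chars.replace.go [' '] [] fuel l acc = acc.reverse ++ l.filter (· ≠ ' ') := by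
  intro l
  induction l with
  | nil =>
    intro fuel _ acc
    cases fuel <;> simp [PySem.Chars.replace.go]
  | cons c rest ih =>
    intro fuel hf acc
    cases fuel with
    | zero => simp at hf
    | succ f =>
      rw [show PySem.Chars.replace.go [' '] [] (f+1) (c :: rest) acc
          = if List.isPrefixOf [' '] (c :: rest) then
              PySem.Chars.replace.go [' '] [] f rest acc
            else PySem.Chars.replace.go [' '] [] f rest (c :: acc) from rfl]
      by_cases hc : c = ' '
      · subst hc
        rw [if_pos (by simp [List.isPrefixOf])]
        rw [ih f (by simpa using hf) acc]
        simp
      · rw [if_neg (by simp [List.isPrefixOf]; exact fun h => hc h.symm)]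
        rw [ih f (by simpa using hf) (c :: acc)]
        simp [hc]

theorem pvReplace (s : List Char) :
    PySem.Chars.replace s [' '] [] = s.filter (· ≠ ' ') := by
  rw [show PySem.Chars.replace s [' '] []
      = if List.isEmpty [' '] then [] ++ List.flatMap (fun c => c :: []) s
        else PySem.Chars.replace.go [' '] [] s.length s [] from rfl]
  rw [if_neg (by simp)]
  rw [pvReplaceGo s s.length (le_refl _) []]
  simp

theorem pvMain : ∀ (cs : List Char) (q : Bool), pvF cs q = pvT (List.splitOn '"' cs) q := by
  intro cs
  induction cs with
  | nil => intro q; cases q <;> simp [pvF, pvT, List.splitOn, List.splitOnP, List.splitOnP.go]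
  | cons c rest ih =>
    intro q
    have hne := List.splitOnP_ne_nil (fun x => x == '"') rest
    rcases h : List.splitOnP (fun x => x == '"') rest with _ | ⟨s, t⟩
    · exact absurd h hne
    by_cases hc : c = '"'
    · subst hc
      have hF : pvF ('"' :: rest) q = '"' :: pvF rest (!q) := by
        cases q <;> simp [pvF]
      rw [hF, ih (!q)]
      simp only [List.splitOn, List.splitOnP_cons, h]
      simp [pvT]
    · have hsplit : List.splitOn '"' (c :: rest) = (c :: s) :: t := by
        simp [List.splitOn, List.splitOnP_cons, hc, h, List.modifyHead]
      rw [hsplit]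
      have hF : pvF (c :: rest) q = (if q || c ≠ ' ' then [c] else []) ++ pvF rest q := by
        simp [pvF, hc]
      rw [hF, ih q]
      have hrw : List.splitOn '"' rest = s :: t := by simp [List.splitOn, h]
      rw [hrw]
      rcases t with _ | ⟨r, rs⟩
      · cases q <;> by_cases hs : c = ' ' <;> simp [pvT, hs]
      · cases q <;> by_cases hs : c = ' ' <;> simp [pvT, hs]

theorem pvModNat (k : Nat) : PySem.Int.mod (k : Int) 2 = ((k % 2 : Nat) : Int) := by
  show Int.fmod (k : Int) 2 = _
  rw [Int.fmod_eq_emod]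
  rw [if_pos (Or.inl (by norm_num))]
  omega

theorem pvBside : ∀ (segs : List (List Char)) (k : Nat),
    PySem.Chars.join ['"'] ((PySem.List.enumerate segs (k : Int)).map
      (fun p => if PySem.Int.mod p.1 2 ≠ 0 then p.2 else PySem.Chars.replace p.2 [' '] []))
      = pvT segs (decide (k % 2 = 1)) := by
  intro segs
  induction segs with
  | nil => intro k; simp [PySem.List.enumerate_nil, PySem.Chars.join_nil, pvT]
  | cons s rest ih =>
    intro k
    rw [PySem.List.enumerate_cons]
    rcases rest with _ | ⟨r, rs⟩
    · simp only [PySem.List.enumerate_nil, List.map_cons, List.map_nil, PySem.Chars.join_singleton]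
      rw [pvModNat, pvReplace]
      by_cases hk : k % 2 = 1 <;> simp [pvT, hk] <;> omega
    · rw [PySem.List.enumerate_cons]
      have hcast : (k : Int) + 1 = ((k + 1 : Nat) : Int) := by push_cast; ring
      rw [hcast]
      have := ih (k + 1)
      rw [PySem.List.enumerate_cons] at this
      simp only [List.map_cons] at this ⊢
      rw [PySem.Chars.join_cons_cons, this]
      rw [pvModNat, pvReplace]
      have hpar : decide ((k + 1) % 2 = 1) = !(decide (k % 2 = 1)) := by
        by_cases hk : k % 2 = 1 <;> simp [hk] <;> omega
      rw [hpar]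
      by_cases hk : k % 2 = 1 <;> simp [pvT, hk, List.append_assoc] <;> omega

-- ===== VERDICT (by name: the statement is the Claim_ definition above) =====
theorem remove_extraneous_spaces_spec : Claim_equal_remove_extraneous_spaces := by
  intro eq_str _
  unfold Spec_remove_extraneous_spaces remove_extraneous_spaces remove_extraneous_spaces_alt
  simp only []
  rw [pvFoldA eq_str.toList [] false]
  have h0 : PySem.List.enumerate (PySem.Chars.splitOn eq_str.toList ['"'])
      = PySem.List.enumerate (PySem.Chars.splitOn eq_str.toList ['"']) ((0 : Nat) : Int) := rfl
  rw [h0, pvSplitOn, pvBside (List.splitOn '"' eq_str.toList) 0]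
  rw [show decide (0 % 2 = 1) = false from rfl]
  rw [List.nil_append, pvMain eq_str.toList false]
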